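-- pv_equiv track=rewrite | github.com/alexiosc/cft | testing/testing/__init__.py | asm_memory_banks
-- ===== SOURCE A (Python) =====
-- def asm_memory_banks(mbp=None, mbd=None, mbs=None, mbz=None,
--                      mb4=None, mb5=None, mb6=None, mb7=None):
--     """Generate CFT Assembly to set the specified memory banks."""
--     mbrs = [ [mbp, "MBP"], [mbd, "MBD"], [mbs, "MBS"], [mbz, "MBZ"],
--              [mb4, "4"],   [mb5, "5"],   [mb6, "6"],   [mb7, "7"] ]
--     source = ""
--     source += "        LI        0\n"
--     source += "        SCT\n"
--     ac = None
--     for arg, name in mbrs: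
--         if arg is not None:
--             if ac != arg:
--                 ac = arg
--                 source += "        LI        &{:>02x}\n".format(arg)
--             source += "        SMB       {}\n".format(name)
--
--     return source
-- ===== SOURCE B (Python) =====
-- def _emit(pairs):
--     """Render the runs of consecutive equal bank values: one LI per run,
--     then one SMB per register in the run."""
--     if not pairs:
--         return ""
--     (v, name), rest = pairs[0], pairs[1:]
--     k = 0
--     while k < len(rest) and rest[k][0] == v:
--         k += 1
--     chunk = ("        LI        &{:>02x}\n".format(v)
--              + "        SMB       {}\n".format(name)
--              + "".join("        SMB       {}\n".format(n) for _, n in rest[:k]))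
--     return chunk + _emit(rest[k:])
--
--
-- def asm_memory_banks(mbp=None, mbd=None, mbs=None, mbz=None,
--                      mb4=None, mb5=None, mb6=None, mb7=None):
--     """Generate CFT Assembly to set the specified memory banks."""
--     pairs = [(v, n) for v, n in ((mbp, "MBP"), (mbd, "MBD"), (mbs, "MBS"),
--                                  (mbz, "MBZ"), (mb4, "4"), (mb5, "5"),
--                                  (mb6, "6"), (mb7, "7"))
--              if v is not None]
--     return "        LI        0\n" + "        SCT\n" + _emit(pairs)
-- ===== Notes on version B (the rewrite author's own statement) =====
-- stated objective: alternative
-- what changed: A is a single pass with a mutable accumulator flag 'ac' compared against each value; B first builds the filtered (value, name) list and then renders it run-by-run (one LI per maximal run of equal consecutive values, then the SMBs of the run), a build-then-group decomposition with no mutable comparison state.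
import Mathlib
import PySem

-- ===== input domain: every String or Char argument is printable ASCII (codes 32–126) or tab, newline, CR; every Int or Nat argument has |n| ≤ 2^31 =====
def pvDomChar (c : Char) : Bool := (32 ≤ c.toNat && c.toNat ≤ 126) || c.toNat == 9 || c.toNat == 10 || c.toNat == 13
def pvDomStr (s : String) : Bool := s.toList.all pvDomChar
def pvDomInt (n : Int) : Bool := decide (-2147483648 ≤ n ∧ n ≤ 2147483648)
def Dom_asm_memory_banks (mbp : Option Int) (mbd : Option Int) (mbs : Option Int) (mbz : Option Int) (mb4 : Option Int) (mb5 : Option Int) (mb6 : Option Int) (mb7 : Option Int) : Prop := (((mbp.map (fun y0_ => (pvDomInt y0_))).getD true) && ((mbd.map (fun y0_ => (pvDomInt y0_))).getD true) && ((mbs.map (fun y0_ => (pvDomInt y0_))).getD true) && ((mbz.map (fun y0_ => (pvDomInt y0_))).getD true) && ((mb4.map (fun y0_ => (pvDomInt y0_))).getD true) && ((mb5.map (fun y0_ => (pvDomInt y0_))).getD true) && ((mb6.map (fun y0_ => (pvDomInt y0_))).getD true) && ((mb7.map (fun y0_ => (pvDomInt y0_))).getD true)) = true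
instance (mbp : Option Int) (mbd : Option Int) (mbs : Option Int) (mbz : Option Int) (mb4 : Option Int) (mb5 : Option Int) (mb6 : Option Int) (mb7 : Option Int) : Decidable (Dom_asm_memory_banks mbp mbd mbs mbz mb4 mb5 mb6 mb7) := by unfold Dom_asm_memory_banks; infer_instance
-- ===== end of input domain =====

-- ===== PORT A =====
-- Header line: B renders the same text as A via a build-then-group-runs decomposition instead of A's mutable-accumulator single pass (alternative structure, same cost).
-- Shared helper: exact port of "{:>02x}".format(v) for ints (lowercase hex, '-' sign, left-padded with '0' to width 2), used by both Pythons' identical format strings.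
def pvHexDigit (n : Nat) : Char := if n < 10 then Char.ofNat (48 + n) else Char.ofNat (87 + n)

def pvHexChars (n : Nat) : List Char :=
  if _h : n < 16 then [pvHexDigit n]
  else pvHexChars (n / 16) ++ [pvHexDigit (n % 16)]
decreasing_by exact Nat.div_lt_self (by omega) (by omega)

def pvHexFmt (v : Int) : String :=
  let s := if v < 0 then "-" ++ String.ofList (pvHexChars (-v).toNat) else String.ofList (pvHexChars v.toNat)
  if s.length < 2 then "0" ++ s else s

def pvLI (v : Int) : String := "        LI        &" ++ pvHexFmt v ++ "\n"
def pvSMB (name : String) : String := "        SMB       " ++ name ++ "\n"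

-- A's loop: for (arg, name) in mbrs: if arg is not None: if ac != arg: emit LI; emit SMB
def pvLoopA : List (Option Int × String) → Option Int → String → String
  | [], _, src => src
  | (arg, name) :: rest, ac, src =>
    match arg with
    | none => pvLoopA rest ac src
    | some a =>
      if ac ≠ some a then pvLoopA rest (some a) (src ++ pvLI a ++ pvSMB name)
      else pvLoopA rest ac (src ++ pvSMB name)

def asm_memory_banks (mbp : Option Int) (mbd : Option Int) (mbs : Option Int) (mbz : Option Int) (mb4 : Option Int) (mb5 : Option Int) (mb6 : Option Int) (mb7 : Option Int) : String :=
  let mbrs : List (Option Int × String) :=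
    [(mbp, "MBP"), (mbd, "MBD"), (mbs, "MBS"), (mbz, "MBZ"),
     (mb4, "4"), (mb5, "5"), (mb6, "6"), (mb7, "7")]
  pvLoopA mbrs none ("" ++ "        LI        0\n" ++ "        SCT\n")

-- ===== PORT B =====
-- B's filter comprehension: keep only the registers whose value is not None.
def pvPairs (l : List (Option Int × String)) : List (Int × String) :=
  l.filterMap (fun p => p.1.map (fun v => (v, p.2)))

-- B's _emit: one LI for the maximal run of equal consecutive values, then its SMBs; recurse on the rest.
def pvEmit : List (Int × String) → String
  | [] => ""
  | (v, name) :: rest =>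
    pvLI v ++ pvSMB name
      ++ String.join ((rest.takeWhile (fun p => p.1 == v)).map (fun p => pvSMB p.2))
      ++ pvEmit (rest.dropWhile (fun p => p.1 == v))
termination_by l => l.length
decreasing_by
  have := List.length_dropWhile_le (fun p => p.1 == v) rest
  simp only [List.length_cons]
  omega

def asm_memory_banks_alt (mbp : Option Int) (mbd : Option Int) (mbs : Option Int) (mbz : Option Int) (mb4 : Option Int) (mb5 : Option Int) (mb6 : Option Int) (mb7 : Option Int) : String :=
  let pairs := pvPairs
    [(mbp, "MBP"), (mbd, "MBD"), (mbs, "MBS"), (mbz, "MBZ"),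
     (mb4, "4"), (mb5, "5"), (mb6, "6"), (mb7, "7")]
  "        LI        0\n" ++ "        SCT\n" ++ pvEmit pairs

-- ===== PRECONDITION & SPEC =====
def Spec_asm_memory_banks (mbp : Option Int) (mbd : Option Int) (mbs : Option Int) (mbz : Option Int) (mb4 : Option Int) (mb5 : Option Int) (mb6 : Option Int) (mb7 : Option Int) (out : String) : Prop := out = asm_memory_banks_alt mbp mbd mbs mbz mb4 mb5 mb6 mb7
instance (mbp : Option Int) (mbd : Option Int) (mbs : Option Int) (mbz : Option Int) (mb4 : Option Int) (mb5 : Option Int) (mb6 : Option Int) (mb7 : Option Int) (out : String) : Decidable (Spec_asm_memory_banks mbp mbd mbs mbz mb4 mb5 mb6 mb7 out) := by unfold Spec_asm_memory_banks; infer_instance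

-- ===== CLAIM (what is proved, stated in full; the proofs are below) =====
def Claim_equal_asm_memory_banks : Prop := ∀ (mbp : Option Int) (mbd : Option Int) (mbs : Option Int) (mbz : Option Int) (mb4 : Option Int) (mb5 : Option Int) (mb6 : Option Int) (mb7 : Option Int), Dom_asm_memory_banks mbp mbd mbs mbz mb4 mb5 mb6 mb7 → Spec_asm_memory_banks mbp mbd mbs mbz mb4 mb5 mb6 mb7 (asm_memory_banks mbp mbd mbs mbz mb4 mb5 mb6 mb7)

-- ===== LEMMAS AND PROOFS =====

theorem pvJoin_cons (s : String) (l : List String) : String.join (s :: l) = s ++ String.join l := by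
  simp [String.join_eq]

theorem pvEmit_nil : pvEmit [] = "" := by simp [pvEmit]

theorem pvEmit_cons (v : Int) (name : String) (rest : List (Int × String)) :
    pvEmit ((v, name) :: rest)
      = pvLI v ++ pvSMB name
        ++ String.join ((rest.takeWhile (fun p => p.1 == v)).map (fun p => pvSMB p.2))
        ++ pvEmit (rest.dropWhile (fun p => p.1 == v)) := by
  conv_lhs => rw [pvEmit.eq_def]

-- Abstract rendering of A's loop over an already-filtered list, parametrised by the accumulator.
def pvE : List (Int × String) → Option Int → String
  | [], _ => ""
  | (v, n) :: rest, ac =>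
    if ac = some v then pvSMB n ++ pvE rest ac
    else pvLI v ++ pvSMB n ++ pvE rest (some v)

theorem pvLoopA_eq_pvE (l : List (Option Int × String)) :
    ∀ (ac : Option Int) (src : String), pvLoopA l ac src = src ++ pvE (pvPairs l) ac := by
  induction l with
  | nil => intro ac src; simp [pvLoopA, pvPairs, pvE]
  | cons p rest ih =>
    intro ac src
    obtain ⟨arg, name⟩ := p
    cases arg with
    | none => simp [pvLoopA, pvPairs, ih]
    | some a =>
      by_cases h : ac = some a
      · simp [pvLoopA, h, pvPairs, ih, pvE, String.append_assoc]
      · simp [pvLoopA, h, pvPairs, ih, pvE, String.append_assoc]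

theorem pvE_some (l : List (Int × String)) :
    ∀ v : Int, pvE l (some v)
      = String.join ((l.takeWhile (fun p => p.1 == v)).map (fun p => pvSMB p.2))
        ++ pvEmit (l.dropWhile (fun p => p.1 == v)) := by
  induction l with
  | nil => intro v; simp [pvE, pvEmit_nil, String.join]
  | cons p rest ih =>
    intro v
    obtain ⟨w, n⟩ := p
    by_cases h : w = v
    · subst h
      simp [pvE, ih, pvJoin_cons, String.append_assoc]
    · have h' : ¬ v = w := fun hc => h hc.symm
      have hb : (w == v) = false := by simp [h]
      simp [pvE, h', hb, pvEmit_cons, ih, String.append_assoc, String.join]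

theorem pvE_none (l : List (Int × String)) : pvE l none = pvEmit l := by
  cases l with
  | nil => simp [pvE, pvEmit_nil]
  | cons p rest =>
    obtain ⟨v, n⟩ := p
    simp [pvE, pvE_some, pvEmit_cons, String.append_assoc]

-- ===== VERDICT (by name: the statement is the Claim_ definition above) =====
theorem asm_memory_banks_spec : Claim_equal_asm_memory_banks := by
  intro mbp mbd mbs mbz mb4 mb5 mb6 mb7 _
  unfold Spec_asm_memory_banks asm_memory_banks asm_memory_banks_alt
  rw [pvLoopA_eq_pvE, pvE_none]
  simp
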